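-- pv_equiv track=rewrite | github.com/bsuir-cesium/oaip-4 | main.py | has_symbol
-- ===== SOURCE A (Python) =====
-- def has_symbol(s: list[str]) -> bool:
--     result: bool = False
--     result_for_symbol: bool = False
--     next_appear: int
--     i: int
--     j: int
--     k: int
--
--     for i in range(0, len(s) - 1):
--         next_appear = i
--         result_for_symbol = False
--         for j in range(i + 1, len(s)):
--             if s[i] == s[j] and j - next_appear > 1:
--                 for k in range(next_appear + 1, j):
--                     if (s[k] == "A") or (s[k] == "B"):
--                         result_for_symbol = True
--                         break
--                     else:
--                         result_for_symbol = False
--                 next_appear = j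
--         if result_for_symbol:
--             result = True
--             break
--     return result
-- ===== SOURCE B (Python) =====
-- def has_symbol(s: list[str]) -> bool:
--     n = len(s)
--     # prefix counts of "A"/"B": pref[m] = number of A/B among s[0:m]
--     pref = [0] * (n + 1)
--     for idx in range(n):
--         pref[idx + 1] = pref[idx] + (s[idx] == "A" or s[idx] == "B")
--
--     def check(i):
--         next_appear = i
--         flag = False
--         for j in range(i + 1, n):
--             if s[j] == s[i] and j - next_appear > 1:
--                 flag = pref[j] > pref[next_appear + 1]
--                 next_appear = j
--         return flag
--
--     return any(check(i) for i in range(n - 1))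
-- ===== Notes on version B (the rewrite author's own statement) =====
-- stated objective: alternative
-- what changed: A prefix-count table of A/B occurrences built once replaces A's innermost scan of each segment (the k-loop disappears: a segment contains A/B iff its prefix counts differ), and the outer break-loop becomes an any() over a per-index check.
import Mathlib
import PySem

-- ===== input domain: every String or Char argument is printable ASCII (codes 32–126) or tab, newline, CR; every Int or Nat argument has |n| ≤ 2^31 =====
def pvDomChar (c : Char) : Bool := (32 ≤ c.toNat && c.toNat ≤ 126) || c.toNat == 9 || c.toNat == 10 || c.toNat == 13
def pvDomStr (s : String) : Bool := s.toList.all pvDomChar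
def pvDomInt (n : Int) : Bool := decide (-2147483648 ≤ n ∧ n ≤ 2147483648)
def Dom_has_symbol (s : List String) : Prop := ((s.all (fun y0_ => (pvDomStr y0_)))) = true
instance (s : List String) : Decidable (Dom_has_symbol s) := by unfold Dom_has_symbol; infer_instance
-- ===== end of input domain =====

-- B replaces A's innermost segment scan by a prefix-count table of "A"/"B" occurrences built once (objective: alternative).

-- ===== PORT A =====
-- all indices fed to pyGetD come from ranges inside [0, len s), where pyGetD is exact (= Python's s[k])

-- the k-loop: 'for k in range(...): if s[k] in ("A","B"): flag=True; break else: flag=False'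
def kLoopA (s : List String) (flag : Bool) : List Int → Bool
  | [] => flag
  | k :: rest =>
    if PySem.List.pyGetD s k "" == "A" || PySem.List.pyGetD s k "" == "B" then true
    else kLoopA s false rest

-- the j-loop, carrying (next_appear, result_for_symbol)
def jLoopA (s : List String) (i : Int) : Int → Bool → List Int → Bool
  | _, flag, [] => flag
  | na, flag, j :: rest =>
    if PySem.List.pyGetD s i "" == PySem.List.pyGetD s j "" && decide (j - na > 1) then
      jLoopA s i j (kLoopA s flag (PySem.List.pyRange (na + 1) j 1)) rest
    else jLoopA s i na flag rest

-- the i-loop with its break-on-success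
def iLoopA (s : List String) : List Int → Bool
  | [] => false
  | i :: rest =>
    if jLoopA s i i false (PySem.List.pyRange (i + 1) (s.length : Int) 1) then true
    else iLoopA s rest

def has_symbol (s : List String) : Bool :=
  iLoopA s (PySem.List.pyRange 0 ((s.length : Int) - 1) 1)

-- ===== PORT B =====
-- prefix-count table: pref[m] = number of "A"/"B" among s[0:m]  (Source B's pref[] loop, as a scan)
def prefAB (s : List String) (acc : Int) : List Int :=
  match s with
  | [] => [acc]
  | c :: rest => acc :: prefAB rest (acc + (if c == "A" || c == "B" then 1 else 0))

-- Source B's check(i): one fold over j, segment emptiness answered by the prefix table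
def checkB (s : List String) (pref : List Int) (i : Int) : Bool :=
  ((PySem.List.pyRange (i + 1) (s.length : Int) 1).foldl
    (fun (st : Int × Bool) j =>
      if PySem.List.pyGetD s j "" == PySem.List.pyGetD s i "" && decide (j - st.1 > 1) then
        (j, decide (PySem.List.pyGetD pref j 0 > PySem.List.pyGetD pref (st.1 + 1) 0))
      else st)
    (i, false)).2

def has_symbol_alt (s : List String) : Bool :=
  let pref := prefAB s 0
  (PySem.List.pyRange 0 ((s.length : Int) - 1) 1).any (fun i => checkB s pref i)

-- ===== PRECONDITION & SPEC =====
def Spec_has_symbol (s : List String) (out : Bool) : Prop := out = has_symbol_alt s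
instance (s : List String) (out : Bool) : Decidable (Spec_has_symbol s out) := by unfold Spec_has_symbol; infer_instance

-- ===== CLAIM (what is proved, stated in full; the proofs are below) =====
def Claim_equal_has_symbol : Prop := ∀ (s : List String), Dom_has_symbol s → Spec_has_symbol s (has_symbol s)

-- ===== LEMMAS AND PROOFS =====

-- count of "A"/"B" in a list
def cntAB (l : List String) : Nat := l.countP (fun c => c == "A" || c == "B")

theorem cntAB_take_mono (s : List String) {m m' : Nat} (h : m ≤ m') :
    cntAB (s.take m) ≤ cntAB (s.take m') := by
  unfold cntAB
  exact (List.take_prefix_take_left h).sublist.countP_le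

theorem cntAB_take_succ (s : List String) {m : Nat} (h : m < s.length) :
    cntAB (s.take (m + 1)) = cntAB (s.take m) + (if s[m] == "A" || s[m] == "B" then 1 else 0) := by
  unfold cntAB
  rw [List.take_add_one, List.countP_append]
  simp [List.getElem?_eq_getElem h]

theorem prefAB_length (s : List String) (acc : Int) : (prefAB s acc).length = s.length + 1 := by
  induction s generalizing acc with
  | nil => simp [prefAB]
  | cons c rest ih => simp [prefAB, ih]

theorem prefAB_getD (s : List String) (acc : Int) {m : Nat} (h : m ≤ s.length) :
    (prefAB s acc).getD m 0 = acc + (cntAB (s.take m) : Int) := by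
  induction s generalizing acc m with
  | nil =>
    have : m = 0 := by simpa using h
    subst this
    simp [prefAB, cntAB]
  | cons c rest ih =>
    cases m with
    | zero => simp [prefAB, cntAB]
    | succ m' =>
      simp only [prefAB, List.getD_cons_succ]
      rw [ih _ (by simpa using h)]
      simp only [List.take_succ_cons, cntAB, List.countP_cons]
      split <;> push_cast <;> ring

theorem kLoopA_eq_any (s : List String) (flag : Bool) (L : List Int) (h : L ≠ []) :
    kLoopA s flag L
      = L.any (fun k => PySem.List.pyGetD s k "" == "A" || PySem.List.pyGetD s k "" == "B") := by
  induction L generalizing flag with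
  | nil => cases h rfl
  | cons k rest ih =>
    rw [kLoopA, List.any_cons]
    by_cases hk : (PySem.List.pyGetD s k "" == "A" || PySem.List.pyGetD s k "" == "B") = true
    · simp [hk]
    · rw [if_neg hk]
      simp only [Bool.not_eq_true] at hk
      rw [hk, Bool.false_or]
      cases rest with
      | nil => simp [kLoopA]
      | cons a t => exact ih _ (by simp)

theorem range_any_eq_cnt (s : List String) (a b : Int) (ha : 0 ≤ a) (hab : a ≤ b)
    (hb : b ≤ (s.length : Int)) :
    (PySem.List.pyRange a b 1).any
        (fun k => PySem.List.pyGetD s k "" == "A" || PySem.List.pyGetD s k "" == "B")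
      = decide (cntAB (s.take a.toNat) < cntAB (s.take b.toNat)) := by
  obtain ⟨n, hn⟩ : ∃ n : Nat, (b - a).toNat = n := ⟨_, rfl⟩
  induction n generalizing a with
  | zero =>
    have : a = b := by omega
    subst this
    simp [PySem.List.pyRange_one_eq_nil le_rfl]
  | succ n ih =>
    have hab' : a < b := by omega
    have haN : a.toNat < s.length := by omega
    rw [PySem.List.pyRange_one_cons hab', List.any_cons,
        ih (a + 1) (by omega) (by omega) (by omega),
        PySem.List.pyGetD_eq_getElem s "" ha (by omega)]
    have hsucc := cntAB_take_succ s haN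
    have ht : (a + 1).toNat = a.toNat + 1 := by omega
    have hmono := cntAB_take_mono s (show (a + 1).toNat ≤ b.toNat by omega)
    by_cases hA : (s[a.toNat] == "A" || s[a.toNat] == "B") = true
    · rw [hA, Bool.true_or]
      rw [hA, if_pos rfl] at hsucc
      have : cntAB (s.take a.toNat) < cntAB (s.take b.toNat) := by
        rw [ht] at hmono; omega
      simp [this]
    · simp only [Bool.not_eq_true] at hA
      rw [hA, Bool.false_or, ht, hsucc, hA]
      simp

theorem jLoopA_eq_foldB (s : List String) (i : Int) (L : List Int)
    (hL : ∀ j ∈ L, 0 ≤ j ∧ j < (s.length : Int)) (na : Int) (flag : Bool) (hna : 0 ≤ na) :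
    jLoopA s i na flag L
      = (L.foldl
          (fun (st : Int × Bool) j =>
            if PySem.List.pyGetD s j "" == PySem.List.pyGetD s i "" && decide (j - st.1 > 1) then
              (j, decide (PySem.List.pyGetD (prefAB s 0) j 0
                            > PySem.List.pyGetD (prefAB s 0) (st.1 + 1) 0))
            else st)
          (na, flag)).2 := by
  induction L generalizing na flag with
  | nil => rfl
  | cons j rest ih =>
    obtain ⟨hj0, hjlt⟩ := hL j (by simp)
    rw [jLoopA, List.foldl_cons]
    have hcomm : (PySem.List.pyGetD s j "" == PySem.List.pyGetD s i "")
        = (PySem.List.pyGetD s i "" == PySem.List.pyGetD s j "") := by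
      exact Bool.beq_comm
    by_cases hc : (PySem.List.pyGetD s i "" == PySem.List.pyGetD s j ""
        && decide (j - na > 1)) = true
    · have hgap : j - na > 1 := of_decide_eq_true (Bool.and_elim_right hc)
      rw [if_pos hc]
      have hB : (if PySem.List.pyGetD s j "" == PySem.List.pyGetD s i ""
            && decide (j - (na, flag).1 > 1) then
            ((j, decide (PySem.List.pyGetD (prefAB s 0) j 0
                > PySem.List.pyGetD (prefAB s 0) ((na, flag).1 + 1) 0)) : Int × Bool)
          else (na, flag))
          = (j, decide (PySem.List.pyGetD (prefAB s 0) j 0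
                > PySem.List.pyGetD (prefAB s 0) (na + 1) 0)) := by
        rw [if_pos (by rw [hcomm]; exact hc)]
      rw [hB]
      -- the k-loop equals the prefix-table test
      have hk : kLoopA s flag (PySem.List.pyRange (na + 1) j 1)
          = decide (PySem.List.pyGetD (prefAB s 0) j 0
              > PySem.List.pyGetD (prefAB s 0) (na + 1) 0) := by
        have hne : PySem.List.pyRange (na + 1) j 1 ≠ [] := by
          rw [PySem.List.pyRange_one_cons (by omega)]; simp
        rw [kLoopA_eq_any s flag _ hne,
            range_any_eq_cnt s (na + 1) j (by omega) (by omega) (by omega)]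
        have e1 : PySem.List.pyGetD (prefAB s 0) j 0 = (prefAB s 0).getD j.toNat 0 := by
          rw [PySem.List.pyGetD_eq_getElem _ _ hj0 (by rw [prefAB_length]; omega),
              List.getD_eq_getElem _ _ (by rw [prefAB_length]; omega)]
        have e2 : PySem.List.pyGetD (prefAB s 0) (na + 1) 0
            = (prefAB s 0).getD (na + 1).toNat 0 := by
          rw [PySem.List.pyGetD_eq_getElem _ _ (by omega) (by rw [prefAB_length]; omega),
              List.getD_eq_getElem _ _ (by rw [prefAB_length]; omega)]
        rw [e1, e2, prefAB_getD s 0 (by omega), prefAB_getD s 0 (by omega)]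
        exact decide_eq_decide.mpr (by omega)
      rw [hk]
      exact ih (fun x hx => hL x (by simp [hx])) j _ hj0
    · rw [if_neg hc]
      have hB : (if PySem.List.pyGetD s j "" == PySem.List.pyGetD s i ""
            && decide (j - (na, flag).1 > 1) then
            ((j, decide (PySem.List.pyGetD (prefAB s 0) j 0
                > PySem.List.pyGetD (prefAB s 0) ((na, flag).1 + 1) 0)) : Int × Bool)
          else (na, flag)) = (na, flag) := by
        rw [if_neg (by rw [hcomm]; exact hc)]
      rw [hB]
      exact ih (fun x hx => hL x (by simp [hx])) na flag hna

theorem check_eq (s : List String) (i : Int) (hi : 0 ≤ i) :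
    jLoopA s i i false (PySem.List.pyRange (i + 1) (s.length : Int) 1)
      = checkB s (prefAB s 0) i := by
  unfold checkB
  exact jLoopA_eq_foldB s i _
    (fun j hj => by
      have := PySem.List.mem_pyRange_one.mp hj
      exact ⟨by omega, this.2⟩)
    i false hi

theorem iLoopA_eq_any (s : List String) (L : List Int) (hL : ∀ i ∈ L, 0 ≤ i) :
    iLoopA s L = L.any (fun i => checkB s (prefAB s 0) i) := by
  induction L with
  | nil => rfl
  | cons i rest ih =>
    rw [iLoopA, List.any_cons, check_eq s i (hL i (by simp))]
    by_cases h : checkB s (prefAB s 0) i = true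
    · simp [h]
    · simp only [Bool.not_eq_true] at h
      rw [h, if_neg (by simp), Bool.false_or]
      exact ih (fun x hx => hL x (by simp [hx]))

-- ===== VERDICT (by name: the statement is the Claim_ definition above) =====
theorem has_symbol_spec : Claim_equal_has_symbol := by
  intro s _
  unfold Spec_has_symbol has_symbol has_symbol_alt
  exact iLoopA_eq_any s _ (fun i hi => ((PySem.List.mem_pyRange_one).1 hi).1)
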